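-- pv_equiv track=rewrite | github.com/michaelayoade/dotmac_crm | app/web/admin/crm.py | _collect_quote_item_inputs
-- ===== SOURCE A (Python) =====
-- def _collect_quote_item_inputs(
--     descriptions: list[str] | None,
--     quantities: list[str] | None,
--     unit_prices: list[str] | None,
--     inventory_item_ids: list[str] | None,
-- ) -> list[dict]:
--     descriptions = descriptions or []
--     quantities = quantities or []
--     unit_prices = unit_prices or []
--     inventory_item_ids = inventory_item_ids or []
--     max_len = max(
--         len(descriptions),
--         len(quantities),
--         len(unit_prices),
--         len(inventory_item_ids),
--         0,
--     )
--     items: list[dict] = []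
--     for idx in range(max_len):
--         desc = (descriptions[idx] if idx < len(descriptions) else "").strip()
--         qty = (quantities[idx] if idx < len(quantities) else "").strip()
--         price = (unit_prices[idx] if idx < len(unit_prices) else "").strip()
--         inventory_item_id = (
--             inventory_item_ids[idx] if idx < len(inventory_item_ids) else ""
--         ).strip()
--         if not (desc or qty or price or inventory_item_id):
--             continue
--         items.append(
--             {
--                 "description": desc,
--                 "quantity": qty,
--                 "unit_price": price,
--                 "inventory_item_id": inventory_item_id,
--             }
--         )
--     return items
-- ===== SOURCE B (Python) =====
-- def _collect_quote_item_inputs(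
--     descriptions,
--     quantities,
--     unit_prices,
--     inventory_item_ids,
-- ):
--     # Column-wise: each input list is scanned independently, populating an
--     # index-keyed table of per-row field dicts; rows are then emitted in
--     # sorted index order, keeping those with any non-empty stripped field.
--     keys = ("description", "quantity", "unit_price", "inventory_item_id")
--     table = {}
--     for key, col in zip(keys, (descriptions, quantities, unit_prices, inventory_item_ids)):
--         for idx, raw in enumerate(col or []):
--             table.setdefault(idx, {})[key] = raw.strip()
--     return [
--         row
--         for row in ({k: table[idx].get(k, "") for k in keys} for idx in sorted(table))
--         if any(row.values())
--     ]
-- ===== Notes on version B (the rewrite author's own statement) =====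
-- stated objective: alternative
-- what changed: B traverses column-wise instead of row-wise: each of the four lists is scanned independently to populate an index-keyed table of per-row field dicts, and rows are then emitted in a second stage over sorted(table), replacing A's single index loop with per-list bounds guards.
import Mathlib
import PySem

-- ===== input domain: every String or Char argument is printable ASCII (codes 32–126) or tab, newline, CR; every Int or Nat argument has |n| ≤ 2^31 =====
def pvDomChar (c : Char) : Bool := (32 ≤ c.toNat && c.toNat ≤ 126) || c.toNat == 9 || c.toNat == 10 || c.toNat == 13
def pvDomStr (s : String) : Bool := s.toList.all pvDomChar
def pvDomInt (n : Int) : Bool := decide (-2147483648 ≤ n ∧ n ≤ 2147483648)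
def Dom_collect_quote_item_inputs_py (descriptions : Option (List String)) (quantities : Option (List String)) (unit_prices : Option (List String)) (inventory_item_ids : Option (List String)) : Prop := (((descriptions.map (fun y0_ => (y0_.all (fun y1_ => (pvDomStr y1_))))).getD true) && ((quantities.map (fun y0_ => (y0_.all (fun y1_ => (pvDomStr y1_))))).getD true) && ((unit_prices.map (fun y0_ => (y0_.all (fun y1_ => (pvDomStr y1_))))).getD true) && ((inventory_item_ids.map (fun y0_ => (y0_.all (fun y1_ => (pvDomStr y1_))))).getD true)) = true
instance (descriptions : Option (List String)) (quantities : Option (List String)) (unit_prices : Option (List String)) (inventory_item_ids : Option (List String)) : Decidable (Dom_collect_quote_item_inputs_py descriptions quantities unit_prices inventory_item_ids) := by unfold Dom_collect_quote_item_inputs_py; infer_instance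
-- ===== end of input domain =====

-- B builds the rows column-wise (one pass per input list into an index-keyed table,
-- then a sorted-index emission pass) instead of A's single row-wise index loop
-- (objective: alternative; same result, different traversal).

-- ===== PORT A =====
-- A's loop body: index loop over range(max_len) with 'idx < len' guards
def pvRowsA (ds qs us vs : List String) : List (List (String × String)) :=
  let maxLen : Int :=
    max (max (max (max (ds.length : Int) (qs.length : Int)) (us.length : Int)) (vs.length : Int)) 0
  (PySem.List.pyRange 0 maxLen 1).foldl (fun items idx =>
    let desc := PySem.Str.strip (if idx < (ds.length : Int) then PySem.List.pyGetD ds idx "" else "")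
    let qty := PySem.Str.strip (if idx < (qs.length : Int) then PySem.List.pyGetD qs idx "" else "")
    let price := PySem.Str.strip (if idx < (us.length : Int) then PySem.List.pyGetD us idx "" else "")
    let inv := PySem.Str.strip (if idx < (vs.length : Int) then PySem.List.pyGetD vs idx "" else "")
    if desc = "" ∧ qty = "" ∧ price = "" ∧ inv = "" then items
    else items ++ [[("description", desc), ("quantity", qty), ("unit_price", price), ("inventory_item_id", inv)]]) []

def collect_quote_item_inputs_py (descriptions : Option (List String)) (quantities : Option (List String)) (unit_prices : Option (List String)) (inventory_item_ids : Option (List String)) : List (List (String × String)) :=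
  pvRowsA (descriptions.getD []) (quantities.getD []) (unit_prices.getD []) (inventory_item_ids.getD [])

-- ===== PORT B =====
-- the fixed key tuple
def pvKeysB : List String := ["description", "quantity", "unit_price", "inventory_item_id"]

-- one column pass: for idx, raw in enumerate(col or []): table.setdefault(idx, {})[key] = raw.strip()
-- (setdefault-then-item-assignment = insert at idx of (existing-or-empty row dict) with key bound to the stripped value)
def pvColPass (table : PySem.Dict Int (PySem.Dict String String)) (key : String) (col : List String) : PySem.Dict Int (PySem.Dict String String) :=
  (PySem.List.enumerate col).foldl (fun t p =>
    t.insert p.1 ((t.getD p.1 PySem.Dict.empty).insert key (PySem.Str.strip p.2))) table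

def pvTableB (ds qs us vs : List String) : PySem.Dict Int (PySem.Dict String String) :=
  (List.zip pvKeysB [ds, qs, us, vs]).foldl (fun t kc => pvColPass t kc.1 kc.2) PySem.Dict.empty

def collect_quote_item_inputs_py_alt (descriptions : Option (List String)) (quantities : Option (List String)) (unit_prices : Option (List String)) (inventory_item_ids : Option (List String)) : List (List (String × String)) :=
  let table := pvTableB (descriptions.getD []) (quantities.getD []) (unit_prices.getD []) (inventory_item_ids.getD [])
  -- [row for row in ({k: table[idx].get(k, "") for k in keys} for idx in sorted(table)) if any(row.values())]
  ((PySem.List.sorted table.keys (fun x => x) false).map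
      (fun idx => pvKeysB.map (fun k => (k, (table.getD idx PySem.Dict.empty).getD k "")))).filter
    (fun row => row.any (fun kv => kv.2 != ""))

-- ===== PRECONDITION & SPEC =====
def Spec_collect_quote_item_inputs_py (descriptions : Option (List String)) (quantities : Option (List String)) (unit_prices : Option (List String)) (inventory_item_ids : Option (List String)) (out : List (List (String × String))) : Prop := out = collect_quote_item_inputs_py_alt descriptions quantities unit_prices inventory_item_ids
instance (descriptions : Option (List String)) (quantities : Option (List String)) (unit_prices : Option (List String)) (inventory_item_ids : Option (List String)) (out : List (List (String × String))) : Decidable (Spec_collect_quote_item_inputs_py descriptions quantities unit_prices inventory_item_ids out) := by unfold Spec_collect_quote_item_inputs_py; infer_instance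

-- ===== CLAIM (what is proved, stated in full; the proofs are below) =====
def Claim_equal_collect_quote_item_inputs_py : Prop := ∀ (descriptions : Option (List String)) (quantities : Option (List String)) (unit_prices : Option (List String)) (inventory_item_ids : Option (List String)), Dom_collect_quote_item_inputs_py descriptions quantities unit_prices inventory_item_ids → Spec_collect_quote_item_inputs_py descriptions quantities unit_prices inventory_item_ids (collect_quote_item_inputs_py descriptions quantities unit_prices inventory_item_ids)

-- ===== LEMMAS AND PROOFS =====
-- the guarded element A reads at index k
def pvGetK (l : List String) (k : Nat) : String := if k < l.length then l.getD k "" else ""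

def pvQuad (ds qs us vs : List String) (k : Nat) : (String × String) × (String × String) :=
  ((pvGetK ds k, pvGetK qs k), (pvGetK us k, pvGetK vs k))

-- the row built from one quadruple, kept iff some stripped field is nonempty
def pvRowB (x : (String × String) × (String × String)) : Option (List (String × String)) :=
  let desc := PySem.Str.strip x.1.1
  let qty := PySem.Str.strip x.1.2
  let price := PySem.Str.strip x.2.1
  let inv := PySem.Str.strip x.2.2
  if desc = "" ∧ qty = "" ∧ price = "" ∧ inv = "" then none
  else some [("description", desc), ("quantity", qty), ("unit_price", price), ("inventory_item_id", inv)]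

theorem pvFold_skip_append {α β : Type} (c : α → Prop) [DecidablePred c] (f : α → β)
    (l : List α) (acc : List β) :
    l.foldl (fun items x => if c x then items else items ++ [f x]) acc
      = acc ++ l.filterMap (fun x => if c x then none else some (f x)) := by
  induction l generalizing acc with
  | nil => simp
  | cons h t ih =>
    simp only [List.foldl_cons, List.filterMap_cons]
    by_cases hc : c h
    · simp [hc, ih]
    · simp [hc, ih]

theorem pvRowsA_eq (ds qs us vs : List String) :
    pvRowsA ds qs us vs
      = (List.range (max (max ds.length qs.length) (max us.length vs.length))).filterMap
          (fun k => pvRowB (pvQuad ds qs us vs k)) := by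
  unfold pvRowsA
  have hmax : (max (max (max (max (ds.length : Int) (qs.length : Int)) (us.length : Int)) (vs.length : Int)) 0)
      = ((max (max ds.length qs.length) (max us.length vs.length) : Nat) : Int) := by
    push_cast; omega
  simp only [hmax]
  rw [PySem.List.pyRange_zero_natCast]
  rw [List.foldl_map]
  rw [pvFold_skip_append
    (c := fun k : Nat =>
      PySem.Str.strip (if (k : Int) < (ds.length : Int) then PySem.List.pyGetD ds (k : Int) "" else "") = "" ∧
      PySem.Str.strip (if (k : Int) < (qs.length : Int) then PySem.List.pyGetD qs (k : Int) "" else "") = "" ∧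
      PySem.Str.strip (if (k : Int) < (us.length : Int) then PySem.List.pyGetD us (k : Int) "" else "") = "" ∧
      PySem.Str.strip (if (k : Int) < (vs.length : Int) then PySem.List.pyGetD vs (k : Int) "" else "") = "")
    (f := fun k : Nat =>
      [("description", PySem.Str.strip (if (k : Int) < (ds.length : Int) then PySem.List.pyGetD ds (k : Int) "" else "")),
       ("quantity", PySem.Str.strip (if (k : Int) < (qs.length : Int) then PySem.List.pyGetD qs (k : Int) "" else "")),
       ("unit_price", PySem.Str.strip (if (k : Int) < (us.length : Int) then PySem.List.pyGetD us (k : Int) "" else "")),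
       ("inventory_item_id", PySem.Str.strip (if (k : Int) < (vs.length : Int) then PySem.List.pyGetD vs (k : Int) "" else ""))])]
  rw [List.nil_append]
  apply List.filterMap_congr
  intro k _
  have e : ∀ l : List String,
      (if (k : Int) < (l.length : Int) then PySem.List.pyGetD l (k : Int) "" else "") = pvGetK l k := by
    intro l
    unfold pvGetK
    by_cases hl : k < l.length
    · simp [hl]
    · simp [hl, show ¬((k : Int) < (l.length : Int)) by exact_mod_cast hl]
  simp only [e]
  unfold pvRowB pvQuad
  rfl

-- one column pass, lookup of a row dict (generalized over the enumerate start)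
theorem pvColPass_getD_aux (key : String) (col : List String) (s i : Int)
    (t : PySem.Dict Int (PySem.Dict String String)) :
    ((PySem.List.enumerate col s).foldl (fun t p =>
        t.insert p.1 ((t.getD p.1 PySem.Dict.empty).insert key (PySem.Str.strip p.2))) t).getD i PySem.Dict.empty
      = if s ≤ i ∧ i < s + col.length
        then (t.getD i PySem.Dict.empty).insert key (PySem.Str.strip (col.getD (i - s).toNat ""))
        else t.getD i PySem.Dict.empty := by
  induction col generalizing s t with
  | nil =>
    rw [PySem.List.enumerate_nil, List.foldl_nil,
      if_neg (by simp only [List.length_nil]; push_cast; omega)]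
  | cons x xs ih =>
    rw [PySem.List.enumerate_cons, List.foldl_cons, ih]
    by_cases hi : i = s
    · subst hi
      rw [if_neg (by omega),
        if_pos (by simp only [List.length_cons]; push_cast; omega),
        PySem.Dict.getD_insert, if_pos rfl]
      have h0 : (i - i).toNat = 0 := by omega
      rw [h0]
      rfl
    · rw [PySem.Dict.getD_insert, if_neg hi]
      by_cases hin : s + 1 ≤ i ∧ i < s + 1 + xs.length
      · rw [if_pos hin,
          if_pos (by simp only [List.length_cons]; push_cast; omega)]
        have h2 : (i - s).toNat = (i - (s + 1)).toNat + 1 := by omega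
        rw [h2, List.getD_cons_succ]
      · rw [if_neg hin,
          if_neg (by simp only [List.length_cons]; push_cast; omega)]

theorem pvColPass_getD (key : String) (col : List String) (i : Int)
    (t : PySem.Dict Int (PySem.Dict String String)) :
    (pvColPass t key col).getD i PySem.Dict.empty
      = if 0 ≤ i ∧ i < col.length
        then (t.getD i PySem.Dict.empty).insert key (PySem.Str.strip (col.getD i.toNat ""))
        else t.getD i PySem.Dict.empty := by
  unfold pvColPass
  rw [pvColPass_getD_aux]
  norm_num

theorem pvColPass_keys (key : String) (col : List String)
    (t : PySem.Dict Int (PySem.Dict String String)) :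
    (pvColPass t key col).keys = PySem.Set.update t.keys (PySem.List.pyRange 0 col.length 1) := by
  unfold pvColPass
  rw [PySem.Dict.keys_foldl_insert_key]
  rw [PySem.List.map_fst_enumerate]
  simp

theorem pvTableB_unfold (ds qs us vs : List String) :
    pvTableB ds qs us vs
      = pvColPass (pvColPass (pvColPass (pvColPass PySem.Dict.empty "description" ds)
          "quantity" qs) "unit_price" us) "inventory_item_id" vs := by
  rfl

-- the stripped guarded field B's table yields at integer index i
def pvF (l : List String) (i : Int) : String :=
  if 0 ≤ i ∧ i < l.length then PySem.Str.strip (l.getD i.toNat "") else ""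

theorem pvTableB_row (ds qs us vs : List String) (i : Int) :
    pvKeysB.map (fun k => (k, ((pvTableB ds qs us vs).getD i PySem.Dict.empty).getD k ""))
      = [("description", pvF ds i), ("quantity", pvF qs i),
         ("unit_price", pvF us i), ("inventory_item_id", pvF vs i)] := by
  rw [pvTableB_unfold]
  unfold pvKeysB pvF
  simp only [List.map_cons, List.map_nil]
  rw [pvColPass_getD, pvColPass_getD, pvColPass_getD, pvColPass_getD]
  split_ifs <;>
    simp [PySem.Dict.getD_insert, PySem.Dict.getD_empty]

theorem pvTableB_keys_mem (ds qs us vs : List String) (i : Int) :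
    i ∈ (pvTableB ds qs us vs).keys ↔
      0 ≤ i ∧ i < (max (max ds.length qs.length) (max us.length vs.length) : Nat) := by
  rw [pvTableB_unfold]
  rw [pvColPass_keys, pvColPass_keys, pvColPass_keys, pvColPass_keys]
  simp only [PySem.Set.mem_update, PySem.Dict.keys_empty, List.not_mem_nil, false_or,
    PySem.List.mem_pyRange_one]
  push_cast
  omega

theorem pvTableB_keys_nodup (ds qs us vs : List String) :
    (pvTableB ds qs us vs).keys.Nodup := by
  rw [pvTableB_unfold]
  rw [pvColPass_keys, pvColPass_keys, pvColPass_keys, pvColPass_keys]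
  apply PySem.Set.nodup_update
  apply PySem.Set.nodup_update
  apply PySem.Set.nodup_update
  apply PySem.Set.nodup_update
  simp

theorem pvSorted_keys (ds qs us vs : List String) :
    PySem.List.sorted (pvTableB ds qs us vs).keys (fun x => x) false
      = PySem.List.pyRange 0 ((max (max ds.length qs.length) (max us.length vs.length) : Nat) : Int) 1 := by
  apply PySem.List.sorted_eq_of_perm_of_pairwise_lt
  · rw [List.perm_ext_iff_of_nodup (PySem.List.nodup_pyRange_one _ _) (pvTableB_keys_nodup ds qs us vs)]
    intro a
    rw [PySem.List.mem_pyRange_one, pvTableB_keys_mem]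
  · exact PySem.List.pairwise_lt_pyRange_one _ _

theorem pvFilter_map_eq_filterMap {α β : Type} (f : α → β) (p : β → Bool) (l : List α) :
    (l.map f).filter p = l.filterMap (fun x => if p (f x) then some (f x) else none) := by
  induction l with
  | nil => rfl
  | cons h t ih =>
    simp only [List.map_cons, List.filter_cons, List.filterMap_cons]
    by_cases hp : p (f h) <;> simp [hp, ih]

theorem pvF_natCast (l : List String) (m : Nat) :
    pvF l (m : Int) = PySem.Str.strip (pvGetK l m) := by
  unfold pvF pvGetK
  by_cases h : m < l.length
  · rw [if_pos ⟨Int.natCast_nonneg m, by exact_mod_cast h⟩, if_pos h, Int.toNat_natCast]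
  · rw [if_neg (by omega), if_neg h]
    decide

-- ===== VERDICT (by name: the statement is the Claim_ definition above) =====
theorem collect_quote_item_inputs_py_spec : Claim_equal_collect_quote_item_inputs_py := by
  intro d q u v _
  unfold Spec_collect_quote_item_inputs_py collect_quote_item_inputs_py collect_quote_item_inputs_py_alt
  dsimp only
  rw [pvRowsA_eq, pvSorted_keys, PySem.List.pyRange_zero_natCast, List.map_map,
    pvFilter_map_eq_filterMap]
  apply List.filterMap_congr
  intro k _
  simp only [Function.comp]
  rw [pvTableB_row]
  rw [pvF_natCast, pvF_natCast, pvF_natCast, pvF_natCast]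
  unfold pvRowB pvQuad
  by_cases h1 : PySem.Str.strip (pvGetK (d.getD []) k) = "" <;>
  by_cases h2 : PySem.Str.strip (pvGetK (q.getD []) k) = "" <;>
  by_cases h3 : PySem.Str.strip (pvGetK (u.getD []) k) = "" <;>
  by_cases h4 : PySem.Str.strip (pvGetK (v.getD []) k) = "" <;>
    simp [h1, h2, h3, h4]
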